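-- pv_equiv track=rewrite | github.com/James-Yip/TGODC-DKRN | utils/data_utils.py | obtain_dialogue_context_keyword_list
-- ===== SOURCE A (Python) =====
-- def obtain_dialogue_context_keyword_list(context_strs, keywords_strs, histories_strs):
--     dialogue_context_keyword_list = []
--     contexts = [context_str.split() for context_str in context_strs]
--     keywords = [keywords_str.split() for keywords_str in keywords_strs]
--     # histories_lengths: #utterances of each conversation history
--     # note: each history contains several utterances separated by '|||'
--     histories_lengths = [len(history.split('|||')) for history in histories_strs]
--     single_dialogue_context_keywords_list = []
--     for idx in range(len(histories_lengths) - 1):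
--         if histories_lengths[idx] <= histories_lengths[idx+1]:
--             single_dialogue_context_keywords_list.append([contexts[idx], keywords[idx]])
--         else:
--             single_dialogue_context_keywords_list.append([contexts[idx], keywords[idx]])
--             dialogue_context_keyword_list.append(single_dialogue_context_keywords_list)
--             single_dialogue_context_keywords_list = []
--     single_dialogue_context_keywords_list.append([contexts[-1], keywords[-1]])
--     dialogue_context_keyword_list.append(single_dialogue_context_keywords_list)
--
--     return dialogue_context_keyword_list
-- ===== SOURCE B (Python) =====
-- def obtain_dialogue_context_keyword_list(context_strs, keywords_strs, histories_strs):
--     histories_lengths = [len(history.split('|||')) for history in histories_strs]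
--     items = [[context_strs[i].split(), keywords_strs[i].split()]
--              for i in range(len(histories_lengths) - 1)]
--     items.append([context_strs[-1].split(), keywords_strs[-1].split()])
--     cuts = [i + 1 for i in range(len(histories_lengths) - 1)
--             if histories_lengths[i] > histories_lengths[i + 1]]
--     starts = [0] + cuts
--     ends = cuts + [len(items)]
--     return [items[s:e] for s, e in zip(starts, ends)]
-- ===== Notes on version B (the rewrite author's own statement) =====
-- stated objective: alternative
-- what changed: Replaces A's stateful accumulate-and-flush loop (appending to a running group and resetting it at each boundary) by a declarative pipeline: build the item list, compute the boundary cut indices where a history length drops, and partition the items by list slicing between consecutive cut points.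
import Mathlib
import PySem

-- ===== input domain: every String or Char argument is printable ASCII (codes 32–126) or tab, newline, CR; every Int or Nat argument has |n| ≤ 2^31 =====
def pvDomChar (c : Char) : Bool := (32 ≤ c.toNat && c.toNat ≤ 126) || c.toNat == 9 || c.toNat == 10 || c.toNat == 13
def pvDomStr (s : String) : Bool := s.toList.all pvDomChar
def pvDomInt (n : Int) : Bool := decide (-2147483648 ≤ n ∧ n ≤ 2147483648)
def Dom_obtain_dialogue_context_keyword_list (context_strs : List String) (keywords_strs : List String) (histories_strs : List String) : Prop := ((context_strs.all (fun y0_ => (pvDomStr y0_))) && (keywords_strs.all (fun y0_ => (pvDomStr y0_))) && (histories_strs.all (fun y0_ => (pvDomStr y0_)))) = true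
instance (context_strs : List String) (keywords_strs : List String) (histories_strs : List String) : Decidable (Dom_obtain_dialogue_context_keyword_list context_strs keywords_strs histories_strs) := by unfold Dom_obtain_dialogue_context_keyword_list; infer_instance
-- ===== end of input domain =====

-- B replaces A's stateful accumulate-and-flush loop by a declarative pipeline (items list, boundary
-- cut indices, slicing between consecutive cuts); same return value on Pre_, no speed claim.

-- ===== PORT A =====
def obtain_dialogue_context_keyword_list (context_strs : List String) (keywords_strs : List String) (histories_strs : List String) : List (List (List (List String))) :=
  let contexts := context_strs.map (fun s => PySem.Str.split₀ s)
  let keywords := keywords_strs.map (fun s => PySem.Str.split₀ s)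
  let histories_lengths := histories_strs.map (fun h => (PySem.Chars.splitOn h.toList "|||".toList).length)
  let st := (PySem.List.pyRange 0 ((histories_lengths.length : Int) - 1)).foldl
    (fun (st : List (List (List (List String))) × List (List (List String))) idx =>
      if PySem.List.pyGetD histories_lengths idx 0 ≤ PySem.List.pyGetD histories_lengths (idx + 1) 0 then
        (st.1, st.2 ++ [[PySem.List.pyGetD contexts idx [], PySem.List.pyGetD keywords idx []]])
      else
        (st.1 ++ [st.2 ++ [[PySem.List.pyGetD contexts idx [], PySem.List.pyGetD keywords idx []]]], []))
    ([], [])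
  let single := st.2 ++ [[PySem.List.pyGetD contexts (-1) [], PySem.List.pyGetD keywords (-1) []]]
  st.1 ++ [single]

-- ===== PORT B =====
def obtain_dialogue_context_keyword_list_alt (context_strs : List String) (keywords_strs : List String) (histories_strs : List String) : List (List (List (List String))) :=
  let histories_lengths := histories_strs.map (fun h => (PySem.Chars.splitOn h.toList "|||".toList).length)
  let items0 := (List.range (histories_lengths.length - 1)).map (fun (i : Nat) =>
      [PySem.Str.split₀ (PySem.List.pyGetD context_strs (i : Int) ""),
       PySem.Str.split₀ (PySem.List.pyGetD keywords_strs (i : Int) "")])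
  let items := items0 ++ [[PySem.Str.split₀ (PySem.List.pyGetD context_strs (-1) ""),
                           PySem.Str.split₀ (PySem.List.pyGetD keywords_strs (-1) "")]]
  let cuts : List Nat := ((List.range (histories_lengths.length - 1)).filter (fun (i : Nat) =>
      decide (PySem.List.pyGetD histories_lengths ((i : Int) + 1) 0 < PySem.List.pyGetD histories_lengths (i : Int) 0))).map (· + 1)
  let starts := 0 :: cuts
  let ends := cuts ++ [items.length]
  (starts.zip ends).map (fun se => PySem.List.slice items (some (se.1 : Int)) (some (se.2 : Int)))

-- ===== PRECONDITION & SPEC =====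
-- Pre_ excludes exactly the inputs on which Python A raises IndexError: empty context or keyword
-- lists (contexts[-1]/keywords[-1]), or fewer contexts/keywords than len(histories_strs) - 1.
def Pre_obtain_dialogue_context_keyword_list (context_strs : List String) (keywords_strs : List String) (histories_strs : List String) : Prop :=
  context_strs ≠ [] ∧ keywords_strs ≠ [] ∧
  histories_strs.length ≤ context_strs.length + 1 ∧ histories_strs.length ≤ keywords_strs.length + 1
instance (context_strs : List String) (keywords_strs : List String) (histories_strs : List String) : Decidable (Pre_obtain_dialogue_context_keyword_list context_strs keywords_strs histories_strs) := by unfold Pre_obtain_dialogue_context_keyword_list; infer_instance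

def pvWitness_obtain_dialogue_context_keyword_list : List String × List String × List String :=
  (["a b"], ["k"], ["u|||u", "u"])

def Spec_obtain_dialogue_context_keyword_list (context_strs : List String) (keywords_strs : List String) (histories_strs : List String) (out : List (List (List (List String)))) : Prop := out = obtain_dialogue_context_keyword_list_alt context_strs keywords_strs histories_strs
instance (context_strs : List String) (keywords_strs : List String) (histories_strs : List String) (out : List (List (List (List String)))) : Decidable (Spec_obtain_dialogue_context_keyword_list context_strs keywords_strs histories_strs out) := by unfold Spec_obtain_dialogue_context_keyword_list; infer_instance

-- ===== CLAIM (what is proved, stated in full; the proofs are below) =====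
def Claim_equal_obtain_dialogue_context_keyword_list : Prop := ∀ (context_strs : List String) (keywords_strs : List String) (histories_strs : List String), Dom_obtain_dialogue_context_keyword_list context_strs keywords_strs histories_strs → Pre_obtain_dialogue_context_keyword_list context_strs keywords_strs histories_strs → Spec_obtain_dialogue_context_keyword_list context_strs keywords_strs histories_strs (obtain_dialogue_context_keyword_list context_strs keywords_strs histories_strs)

-- ===== LEMMAS AND PROOFS =====

-- Abstract versions of the two algorithms, over a cut predicate g and an item function.
def pvStep (g : Nat → Bool) (item : Nat → List (List String))
    (st : List (List (List (List String))) × List (List (List String))) (i : Nat) :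
    List (List (List (List String))) × List (List (List String)) :=
  if g i then (st.1 ++ [st.2 ++ [item i]], []) else (st.1, st.2 ++ [item i])

def pvACore (g : Nat → Bool) (item : Nat → List (List String)) (m : Nat) :
    List (List (List (List String))) × List (List (List String)) :=
  (List.range m).foldl (pvStep g item) ([], [])

def pvCuts (g : Nat → Bool) (m : Nat) : List Nat :=
  ((List.range m).filter g).map (· + 1)

def pvHL (histories_strs : List String) : List Nat :=
  histories_strs.map (fun h => (PySem.Chars.splitOn h.toList "|||".toList).length)

def pvG (hl : List Nat) (i : Nat) : Bool := decide (hl.getD (i+1) 0 < hl.getD i 0)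

def pvItem (cs ks : List String) (i : Nat) : List (List String) :=
  [PySem.Str.split₀ (cs.getD i ""), PySem.Str.split₀ (ks.getD i "")]

def pvLastItem (cs ks : List String) : List (List String) :=
  [PySem.Str.split₀ (cs.getLastD ""), PySem.Str.split₀ (ks.getLastD "")]

lemma pvCuts_mem_le {g : Nat → Bool} {m x : Nat} (hx : x ∈ pvCuts g m) : x ≤ m := by
  simp only [pvCuts, List.mem_map, List.mem_filter, List.mem_range] at hx
  obtain ⟨i, ⟨hi, _⟩, rfl⟩ := hx
  omega

lemma pvLastD_le (g : Nat → Bool) (m : Nat) : (pvCuts g m).getLastD 0 ≤ m := by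
  rcases h : pvCuts g m with _ | ⟨a, l⟩
  · simp
  · refine pvCuts_mem_le (g := g) (m := m) ?_
    rw [h, List.getLastD_cons]
    exact List.getLastD_mem_cons

lemma pvZipLast {α : Type} (x : α) (c : List α) (L : α) :
    (x :: c).zip (c ++ [L]) = (x :: c).zip c ++ [(c.getLastD x, L)] := by
  induction c generalizing x with
  | nil => simp
  | cons a c ih =>
    simp only [List.cons_append, List.zip_cons_cons, ih a, List.getLastD_cons]

lemma pvZipSelf {α : Type} (x : α) (c : List α) (L : α) :
    (x :: (c ++ [L])).zip (c ++ [L]) = (x :: c).zip (c ++ [L]) := by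
  induction c generalizing x with
  | nil => simp
  | cons a c ih => simp [ih a]

-- common slices are unaffected by appending one item at the end
lemma pvMapSlices (g : Nat → Bool) (item : Nat → List (List String)) (m : Nat)
    (x : List (List String)) :
    ((0 :: pvCuts g m).zip (pvCuts g m)).map
        (fun p => (((List.range m).map item ++ [x]).drop p.1).take (p.2 - p.1)) =
    ((0 :: pvCuts g m).zip (pvCuts g m)).map
        (fun p => (((List.range m).map item).drop p.1).take (p.2 - p.1)) := by
  apply List.map_congr_left
  intro p hp
  obtain ⟨h1, h2⟩ := List.of_mem_zip hp
  have hp1 : p.1 ≤ m := by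
    rcases List.mem_cons.mp h1 with h | h
    · omega
    · exact pvCuts_mem_le h
  have hp2 : p.2 ≤ m := pvCuts_mem_le h2
  have hlen : ((List.range m).map item).length = m := by simp
  rw [List.drop_append_of_le_length (by omega), List.take_append_of_le_length (by simp; omega)]

-- the final (open) slice picks up the appended item
lemma pvLastSlice (item : Nat → List (List String)) (m : Nat) (x : List (List String))
    (ls : Nat) (h : ls ≤ m) :
    (((List.range m).map item ++ [x]).drop ls).take (m + 1 - ls) =
    ((List.range m).map item).drop ls ++ [x] := by
  have hlen : ((List.range m).map item).length = m := by simp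
  rw [List.drop_append_of_le_length (by omega)]
  apply List.take_of_length_le
  simp; omega

lemma pvInv (g : Nat → Bool) (item : Nat → List (List String)) (m : Nat) :
    pvACore g item m =
      ( ((0 :: pvCuts g m).zip (pvCuts g m)).map
          (fun p => (((List.range m).map item).drop p.1).take (p.2 - p.1)),
        ((List.range m).map item).drop ((pvCuts g m).getLastD 0) ) := by
  induction m with
  | zero => rfl
  | succ m ih =>
    have hls : (pvCuts g m).getLastD 0 ≤ m := pvLastD_le g m
    have hlen : ((List.range m).map item).length = m := by simp
    have unroll : pvACore g item (m+1) = pvStep g item (pvACore g item m) m := by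
      simp [pvACore, List.range_succ]
    rw [unroll, ih]
    have hitems : (List.range (m+1)).map item = (List.range m).map item ++ [item m] := by
      simp [List.range_succ]
    by_cases hg : g m
    · have hcuts : pvCuts g (m+1) = pvCuts g m ++ [m+1] := by
        simp [pvCuts, List.range_succ, List.filter_append, hg]
      rw [pvStep, if_pos hg]
      refine Prod.ext ?_ ?_
      · show _ ++ _ = _
        rw [hcuts, hitems, show (0 : Nat) :: (pvCuts g m ++ [m+1]) = 0 :: pvCuts g m ++ [m+1] from rfl]
        rw [show (0 : Nat) :: pvCuts g m ++ [m+1] = 0 :: (pvCuts g m ++ [m+1]) from rfl]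
        rw [pvZipSelf, pvZipLast, List.map_append, pvMapSlices]
        congr 1
        simp only [List.map_cons, List.map_nil]
        rw [pvLastSlice item m (item m) _ hls]
      · show ([] : List (List (List String))) = _
        rw [hcuts, hitems]
        have : (pvCuts g m ++ [m+1]).getLastD 0 = m + 1 := by
          simp [List.getLastD_eq_getLast?]
        rw [this]
        rw [List.drop_eq_nil_of_le (by simp)]
    · have hcuts : pvCuts g (m+1) = pvCuts g m := by
        simp [pvCuts, List.range_succ, List.filter_append, hg]
      rw [pvStep, if_neg hg]
      refine Prod.ext ?_ ?_
      · show _ = _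
        rw [hcuts, hitems, pvMapSlices]
      · show _ ++ _ = _
        rw [hcuts, hitems, List.drop_append_of_le_length (by omega)]

-- A's accumulated groups, closed with the final singleton, are exactly B's slices.
lemma pvMain (g : Nat → Bool) (item : Nat → List (List String)) (L : List (List String)) (m : Nat) :
    (pvACore g item m).1 ++ [(pvACore g item m).2 ++ [L]] =
    ((0 :: pvCuts g m).zip (pvCuts g m ++ [m + 1])).map
      (fun p => ((((List.range m).map item) ++ [L]).drop p.1).take (p.2 - p.1)) := by
  rw [pvInv, pvZipLast, List.map_append, pvMapSlices]
  congr 1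
  simp only [List.map_cons, List.map_nil]
  rw [pvLastSlice item m L _ (pvLastD_le g m)]

lemma pvRange_pred (n : Nat) :
    PySem.List.pyRange 0 ((n : Int) - 1) = (List.range (n - 1)).map (Nat.cast : Nat → Int) := by
  cases n with
  | zero => rfl
  | succ k =>
    have h : ((k + 1 : Nat) : Int) - 1 = ((k : Nat) : Int) := by push_cast; ring
    rw [h, PySem.List.pyRange_zero_natCast]
    rfl

lemma pvGetLastD_map (f : String → List String) (l : List String) (h : l ≠ []) :
    (l.map f).getLastD [] = f (l.getLastD "") := by
  simp only [List.getLastD_eq_getLast?, List.getLast?_map]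
  obtain ⟨a, ha⟩ := List.getLast?_isSome.mpr h |> Option.isSome_iff_exists.mp
  simp [ha]

lemma pvGetLast_eq {α : Type} (l : List α) (d : α) (h : l ≠ []) :
    l.getLast h = l.getLastD d := by
  cases l with
  | nil => exact absurd rfl h
  | cons a t => rw [List.getLast_eq_getLastD, List.getLastD_cons]

lemma pvKey (X Y : List (List (List (List String))) × List (List (List String)))
    (p q : List (List String)) (hXY : X = Y) (hpq : p = q) :
    X.1 ++ [X.2 ++ [p]] = Y.1 ++ [Y.2 ++ [q]] := by rw [hXY, hpq]

lemma portA_eval (cs ks hs : List String) (hcs : cs ≠ []) (hks : ks ≠ [])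
    (h1 : hs.length ≤ cs.length + 1) (h2 : hs.length ≤ ks.length + 1) :
    obtain_dialogue_context_keyword_list cs ks hs =
      (pvACore (pvG (pvHL hs)) (pvItem cs ks) (hs.length - 1)).1 ++
        [(pvACore (pvG (pvHL hs)) (pvItem cs ks) (hs.length - 1)).2 ++ [pvLastItem cs ks]] := by
  have hmap_cs : cs.map (fun s => PySem.Str.split₀ s) ≠ [] := by simpa using hcs
  have hmap_ks : ks.map (fun s => PySem.Str.split₀ s) ≠ [] := by simpa using hks
  simp only [obtain_dialogue_context_keyword_list, List.length_map]
  rw [pvRange_pred hs.length, List.foldl_map]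
  refine pvKey _ _ _ _ ?_ ?_
  · -- the fold agrees with pvACore
    rw [pvACore]
    refine PySem.List.foldl_congr_mem _ _ _ _ ?_
    intro acc i hi
    have him : i < hs.length - 1 := List.mem_range.mp hi
    have hic : i < cs.length := by omega
    have hik : i < ks.length := by omega
    have e1 : PySem.List.pyGetD (hs.map (fun h => (PySem.Chars.splitOn h.toList "|||".toList).length)) (i : Int) 0
        = (pvHL hs).getD i 0 := by simp [pvHL]
    have e2 : PySem.List.pyGetD (hs.map (fun h => (PySem.Chars.splitOn h.toList "|||".toList).length)) ((i : Int) + 1) 0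
        = (pvHL hs).getD (i + 1) 0 := by
      rw [show ((i : Int) + 1) = ((i + 1 : Nat) : Int) by push_cast; ring,
        PySem.List.pyGetD_natCast]
      simp [pvHL]
    have e3 : PySem.List.pyGetD (cs.map (fun s => PySem.Str.split₀ s)) (i : Int) []
        = PySem.Str.split₀ (cs.getD i "") := by
      rw [PySem.List.pyGetD_natCast, List.getD_eq_getElem _ _ (by simpa using hic),
        List.getElem_map, List.getD_eq_getElem _ _ hic]
    have e4 : PySem.List.pyGetD (ks.map (fun s => PySem.Str.split₀ s)) (i : Int) []
        = PySem.Str.split₀ (ks.getD i "") := by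
      rw [PySem.List.pyGetD_natCast, List.getD_eq_getElem _ _ (by simpa using hik),
        List.getElem_map, List.getD_eq_getElem _ _ hik]
    rw [e1, e2, e3, e4, pvStep]
    by_cases hle : (pvHL hs).getD i 0 ≤ (pvHL hs).getD (i + 1) 0
    · rw [if_pos hle, if_neg (by simp only [pvG, decide_eq_true_eq]; omega)]
      rfl
    · rw [if_neg hle, if_pos (by simp only [pvG, decide_eq_true_eq]; omega)]
      rfl
  · -- the final singleton agrees
    rw [PySem.List.pyGetD_neg_one _ _ hmap_cs, PySem.List.pyGetD_neg_one _ _ hmap_ks,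
      pvGetLast_eq _ ([] : List String) hmap_cs, pvGetLast_eq _ ([] : List String) hmap_ks,
      pvGetLastD_map _ cs hcs, pvGetLastD_map _ ks hks]
    rfl

lemma portB_eval (cs ks hs : List String) (hcs : cs ≠ []) (hks : ks ≠ []) :
    obtain_dialogue_context_keyword_list_alt cs ks hs =
      ((0 :: pvCuts (pvG (pvHL hs)) (hs.length - 1)).zip
          (pvCuts (pvG (pvHL hs)) (hs.length - 1) ++ [(hs.length - 1) + 1])).map
        (fun p => ((((List.range (hs.length - 1)).map (pvItem cs ks)) ++ [pvLastItem cs ks]).drop p.1).take (p.2 - p.1)) := by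
  simp only [obtain_dialogue_context_keyword_list_alt, List.length_map, ← Nat.cast_succ,
    PySem.List.pyGetD_natCast, PySem.List.pyGetD_neg_one cs "" hcs,
    PySem.List.pyGetD_neg_one ks "" hks, pvGetLast_eq cs "" hcs, pvGetLast_eq ks "" hks,
    PySem.List.slice_natCast, List.length_append, List.length_cons, List.length_nil,
    List.length_range, pvCuts, pvHL, pvLastItem]
  rfl

theorem pv_equal (cs ks hs : List String)
    (hpre : Pre_obtain_dialogue_context_keyword_list cs ks hs) :
    obtain_dialogue_context_keyword_list cs ks hs =
      obtain_dialogue_context_keyword_list_alt cs ks hs := by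
  obtain ⟨hcs, hks, h1, h2⟩ := hpre
  rw [portA_eval cs ks hs hcs hks h1 h2, portB_eval cs ks hs hcs hks, pvMain]

-- ===== VERDICT (by name: the statement is the Claim_ definition above) =====
theorem obtain_dialogue_context_keyword_list_spec : Claim_equal_obtain_dialogue_context_keyword_list := by
  intro cs ks hs _ hpre
  exact pv_equal cs ks hs hpre
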